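-- pv_equiv track=rewrite | github.com/Camsbury/coderbyte | simple_symbols.py | SimpleSymbols
-- ===== SOURCE A (Python) =====
-- def SimpleSymbols(str):
--
--     if str[0].isalpha():
--         return "false"
--     if str[-1].isalpha():
--         return "false"
--
--     for i in range(1,len(str)-1):
--         if str[i].isalpha():
--             if str[i-1] != "+" or str[i+1] != "+":
--                 return "false"
--
--     return "true"
-- ===== SOURCE B (Python) =====
-- def SimpleSymbols(str):
--     parts = str.split("+")
--     if any(c.isalpha() for c in parts[0]) or any(c.isalpha() for c in parts[-1]):
--         return "false"
--     if any(len(p) > 1 and any(c.isalpha() for c in p) for p in parts[1:-1]):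
--         return "false"
--     return "true"
-- ===== Notes on version B (the rewrite author's own statement) =====
-- stated objective: alternative
-- what changed: Replaced the interior index loop over centered triples by splitting the string on '+' and checking segment shapes: no letter in the first or last segment, and any interior segment containing a letter must have length 1.
import Mathlib
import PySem

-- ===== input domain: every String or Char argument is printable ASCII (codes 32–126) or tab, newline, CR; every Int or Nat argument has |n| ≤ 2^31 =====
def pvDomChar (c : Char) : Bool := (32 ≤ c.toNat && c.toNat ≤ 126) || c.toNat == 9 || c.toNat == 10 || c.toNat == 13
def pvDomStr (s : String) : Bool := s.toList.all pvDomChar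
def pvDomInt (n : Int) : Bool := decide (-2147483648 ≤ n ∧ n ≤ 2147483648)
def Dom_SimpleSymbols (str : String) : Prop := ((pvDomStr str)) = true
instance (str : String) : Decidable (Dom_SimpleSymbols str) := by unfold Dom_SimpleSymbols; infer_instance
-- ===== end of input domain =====

-- B replaces A's interior index loop by a split on '+': the string is valid iff the
-- first and last '+'-separated segments contain no letter and every interior segment
-- containing a letter has length 1. Same O(n) cost, a different algorithm.


-- ===== PORT A =====
-- for i in range(1, len(str)-1): if str[i].isalpha(): if str[i-1] != "+" or str[i+1] != "+": return "false"
def SimpleSymbolsLoop (cs : List Char) : List Int → String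
  | [] => "true"
  | i :: rest =>
    match PySem.List.pyGet? cs i with
    | none => "true"   -- unreachable: every i of the range is in bounds
    | some c =>
      if PySem.Chars.isalpha c then
        if PySem.List.pyGet? cs (i-1) ≠ some '+' ∨ PySem.List.pyGet? cs (i+1) ≠ some '+'
        then "false"
        else SimpleSymbolsLoop cs rest
      else SimpleSymbolsLoop cs rest

def SimpleSymbols (str : String) : String :=
  let cs := str.toList
  match PySem.List.pyGet? cs 0 with
  | none => ""        -- str[0] raises IndexError on "": excluded by Pre_
  | some c0 =>
    if PySem.Chars.isalpha c0 then "false"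
    else
      match PySem.List.pyGet? cs (-1) with
      | none => ""
      | some cl =>
        if PySem.Chars.isalpha cl then "false"
        else SimpleSymbolsLoop cs (PySem.List.pyRange 1 ((cs.length : Int) - 1) 1)

-- ===== PORT B =====
-- any(c.isalpha() for c in p)
def pvHasAlpha (p : List Char) : Bool := p.any (fun c => PySem.Chars.isalpha c)

-- parts = str.split("+"); a letter must be absent from parts[0] and parts[-1], and an
-- interior part containing a letter must be that single letter (its neighbours are the '+'s)
def SimpleSymbols_alt (str : String) : String :=
  let parts := str.toList.splitOn '+'
  match PySem.List.pyGet? parts 0, PySem.List.pyGet? parts (-1) with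
  | some p0, some pl =>
    if pvHasAlpha p0 || pvHasAlpha pl then "false"
    else if (PySem.List.slice parts (some 1) (some (-1))).any
              (fun p => decide (1 < p.length) && pvHasAlpha p) then "false"
    else "true"
  | _, _ => ""      -- unreachable: str.split("+") is never the empty list

-- ===== PRECONDITION & SPEC =====
-- Pre_ excludes only the empty string, on which A raises IndexError at str[0].
def Pre_SimpleSymbols (str : String) : Prop := str ≠ ""
instance (str : String) : Decidable (Pre_SimpleSymbols str) := by unfold Pre_SimpleSymbols; infer_instance
def pvWitness_SimpleSymbols : String := "+a+"

def Spec_SimpleSymbols (str : String) (out : String) : Prop := out = SimpleSymbols_alt str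
instance (str : String) (out : String) : Decidable (Spec_SimpleSymbols str out) := by unfold Spec_SimpleSymbols; infer_instance

-- ===== CLAIM (what is proved, stated in full; the proofs are below) =====
def Claim_equal_SimpleSymbols : Prop := ∀ (str : String), Dom_SimpleSymbols str → Pre_SimpleSymbols str → Spec_SimpleSymbols str (SimpleSymbols str)

-- ===== LEMMAS AND PROOFS =====

-- the pair condition both characterisations revolve around:
-- adjacent characters a, b are fine iff neither is a letter missing its '+' neighbour
def pvPairBad (a b : Char) : Bool :=
  (PySem.Chars.isalpha a && b != '+') || (PySem.Chars.isalpha b && a != '+')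

-- per-index condition the A-loop checks at i
def pvOkA (cs : List Char) (i : Int) : Prop :=
  ∀ c, PySem.List.pyGet? cs i = some c → PySem.Chars.isalpha c = true →
    (PySem.List.pyGet? cs (i-1) = some '+' ∧ PySem.List.pyGet? cs (i+1) = some '+')

-- the A-loop only ever returns "true" or "false"
theorem simpleSymbolsLoop_cases (cs : List Char) (is : List Int) :
    SimpleSymbolsLoop cs is = "true" ∨ SimpleSymbolsLoop cs is = "false" := by
  induction is with
  | nil => exact Or.inl rfl
  | cons i rest ih =>
    rw [SimpleSymbolsLoop]
    rcases PySem.List.pyGet? cs i with _ | c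
    · exact Or.inl rfl
    · by_cases ha : PySem.Chars.isalpha c = true
      · simp only [ha, if_true]
        split
        · exact Or.inr rfl
        · exact ih
      · rw [Bool.not_eq_true] at ha
        simp only [ha, Bool.false_eq_true, if_false]
        exact ih

-- the A-loop returns "true" exactly when pvOkA holds at every visited index
theorem simpleSymbolsLoop_true_iff (cs : List Char) (is : List Int)
    (hin : ∀ i ∈ is, PySem.List.pyGet? cs i ≠ none) :
    SimpleSymbolsLoop cs is = "true" ↔ ∀ i ∈ is, pvOkA cs i := by
  induction is with
  | nil => simp [SimpleSymbolsLoop]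
  | cons i rest ih =>
    rw [SimpleSymbolsLoop]
    rcases hg : PySem.List.pyGet? cs i with _ | c
    · exact absurd hg (hin i (List.mem_cons_self))
    · have ih' := ih (fun j hj => hin j (List.mem_cons_of_mem _ hj))
      by_cases ha : PySem.Chars.isalpha c = true
      · simp only [ha, if_true]
        by_cases hb : PySem.List.pyGet? cs (i-1) ≠ some '+' ∨ PySem.List.pyGet? cs (i+1) ≠ some '+'
        · rw [if_pos hb]
          have hok : ¬ pvOkA cs i := by
            intro hok
            have := hok c hg ha
            rcases hb with hb | hb <;> exact hb (by tauto)
          constructor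
          · intro h
            exact absurd h (by decide)
          · intro hall
            exact absurd (hall i List.mem_cons_self) hok
        · rw [if_neg hb, ih']
          simp only [not_or, ne_eq, not_not] at hb
          have hoki : pvOkA cs i := by
            intro c' hc' _
            rw [hg] at hc'
            exact hb
          simp only [List.forall_mem_cons, hoki, true_and]
      · rw [Bool.not_eq_true] at ha
        simp only [ha, Bool.false_eq_true, if_false, ih']
        have hoki : pvOkA cs i := by
          intro c' hc' ha'
          rw [hg] at hc'
          cases hc'
          rw [ha] at ha'
          cases ha'
        simp only [List.forall_mem_cons, hoki, true_and]

-- pvOkA at an in-range Nat index, in getElem form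
theorem pvOkA_iff (cs : List Char) (j : Nat) (h1 : 1 ≤ j) (h2 : j + 1 < cs.length) :
    pvOkA cs (j : Int) ↔
      (PySem.Chars.isalpha (cs[j]'(by omega)) = true →
        cs[j-1]'(by omega) = '+' ∧ cs[j+1]'(by omega) = '+') := by
  have e0 : PySem.List.pyGet? cs (j : Int) = some (cs[j]'(by omega)) :=
    PySem.List.pyGet?_ofNat cs j (by omega)
  have em : PySem.List.pyGet? cs ((j : Int) - 1) = some (cs[j-1]'(by omega)) := by
    have : ((j : Int) - 1) = ((j - 1 : Nat) : Int) := by omega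
    rw [this]
    exact PySem.List.pyGet?_ofNat cs (j-1) (by omega)
  have ep : PySem.List.pyGet? cs ((j : Int) + 1) = some (cs[j+1]'(by omega)) := by
    have : ((j : Int) + 1) = ((j + 1 : Nat) : Int) := by push_cast; ring
    rw [this]
    exact PySem.List.pyGet?_ofNat cs (j+1) (by omega)
  constructor
  · intro hok halpha
    have := hok _ e0 halpha
    rw [em, ep] at this
    exact ⟨Option.some_injective _ this.1, Option.some_injective _ this.2⟩
  · intro h c hc halpha
    rw [e0] at hc
    cases hc
    rw [em, ep]
    exact ⟨congrArg some (h halpha).1, congrArg some (h halpha).2⟩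

-- the bridge: "every interior letter is flanked by plus signs" (A's loop condition)
-- equals "no adjacent pair has a letter with a non-plus neighbour",
-- given that the first and last characters are not letters
theorem pvBridge (cs : List Char) (hne : cs ≠ [])
    (h0 : PySem.Chars.isalpha (cs[0]'(by simpa using List.length_pos_of_ne_nil hne)) = false)
    (hl : PySem.Chars.isalpha (cs[cs.length - 1]'(by have := List.length_pos_of_ne_nil hne; omega)) = false) :
    ((∀ i : Int, 1 ≤ i → i < (cs.length : Int) - 1 → pvOkA cs i) ↔
     (∀ (k : Nat) (h : k + 1 < cs.length),
        pvPairBad (cs[k]'(by omega)) (cs[k+1]'h) = false)) := by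
  have hn : 0 < cs.length := List.length_pos_of_ne_nil hne
  constructor
  · intro hA k hk
    simp only [pvPairBad, Bool.or_eq_false_iff, Bool.and_eq_false_iff, bne_eq_false_iff_eq]
    constructor
    · rcases Bool.eq_false_or_eq_true (PySem.Chars.isalpha (cs[k]'(by omega))) with h | h
      · have hk1 : 1 ≤ k := by
          rcases Nat.eq_zero_or_pos k with rfl | h1
          · rw [h0] at h; cases h
          · exact h1
        exact Or.inr ((pvOkA_iff cs k hk1 hk).mp (hA k (by omega) (by omega)) h).2
      · exact Or.inl h
    · rcases Bool.eq_false_or_eq_true (PySem.Chars.isalpha (cs[k+1]'hk)) with h | h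
      case inr => exact Or.inl h
      · have hk2 : k + 1 + 1 < cs.length := by
          rcases Nat.lt_or_ge (k + 1 + 1) cs.length with h2 | h2
          · exact h2
          · rw [getElem_congr rfl (show k + 1 = cs.length - 1 by omega) hk, hl] at h
            cases h
        have hmid := ((pvOkA_iff cs (k+1) (by omega) hk2).mp (hA ((k+1 : Nat) : Int) (by push_cast; omega) (by push_cast; omega))) h
        exact Or.inr (by
          rw [← getElem_congr rfl (show k + 1 - 1 = k by omega) (by omega : k + 1 - 1 < cs.length)]
          exact hmid.1)
  · intro hB i hi1 hi2
    have hj1 : 1 ≤ i.toNat := by omega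
    have hj2 : i.toNat + 1 < cs.length := by omega
    have hi : i = (i.toNat : Int) := by omega
    rw [hi, pvOkA_iff cs i.toNat hj1 hj2]
    intro halpha
    constructor
    · have hb := hB (i.toNat - 1) (by omega)
      simp only [pvPairBad, Bool.or_eq_false_iff, Bool.and_eq_false_iff,
        bne_eq_false_iff_eq] at hb
      have e : cs[i.toNat - 1 + 1]'(by omega) = cs[i.toNat]'(by omega) :=
        getElem_congr rfl (by omega) (by omega)
      rcases hb.2 with h | h
      · rw [e, halpha] at h; cases h
      · exact h
    · have hb := hB i.toNat hj2
      simp only [pvPairBad, Bool.or_eq_false_iff, Bool.and_eq_false_iff,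
        bne_eq_false_iff_eq] at hb
      rcases hb.1 with h | h
      · rw [halpha] at h; cases h
      · exact h

-- ---- the split-side characterisation ----

-- Prop forms used by the bridge between the two characterisations
def pvNA (p : List Char) : Prop := ∀ c ∈ p, PySem.Chars.isalpha c = false
def pvMO (p : List Char) : Prop := 1 < p.length → pvNA p
def pvCH (cs : List Char) : Prop := List.IsChain (fun a b => pvPairBad a b = false) cs
def pvHeadOk (cs : List Char) : Prop := ∀ c ∈ cs.head?, PySem.Chars.isalpha c = false
def pvLastOk (cs : List Char) : Prop := ∀ c ∈ cs.getLast?, PySem.Chars.isalpha c = false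

theorem pvPairBad_free (a b : Char) (ha : a ≠ '+') (hb : b ≠ '+') :
    pvPairBad a b = false ↔ (PySem.Chars.isalpha a = false ∧ PySem.Chars.isalpha b = false) := by
  simp [pvPairBad, ha, hb]

theorem pvNA_cons (c : Char) (t : List Char) :
    pvNA (c :: t) ↔ PySem.Chars.isalpha c = false ∧ pvNA t := by
  simp [pvNA]

theorem pvMO_cons_cons (b : Char) (t : List Char) :
    (PySem.Chars.isalpha b = false ∧ pvMO (b :: t)) ↔ pvNA (b :: t) := by
  cases t with
  | nil => simp [pvMO, pvNA]
  | cons d t' =>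
    rw [pvNA_cons]
    unfold pvMO
    simp [pvNA_cons]

theorem pvCH_free (p : List Char) (h : '+' ∉ p) : pvCH p ↔ pvMO p := by
  induction p with
  | nil => simp [pvCH, pvMO]
  | cons a t ih =>
    cases t with
    | nil => simp [pvCH, pvMO]
    | cons b t' =>
      have ha : a ≠ '+' := fun e => h (e ▸ List.mem_cons_self)
      have hb : b ≠ '+' := fun e => h (List.mem_cons_of_mem _ (e ▸ List.mem_cons_self))
      have h' : '+' ∉ b :: t' := fun hm => h (List.mem_cons_of_mem _ hm)
      have ih' := ih h'
      unfold pvCH at ih' ⊢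
      rw [List.isChain_cons_cons, pvPairBad_free a b ha hb, ih']
      have hmo : pvMO (a :: b :: t') ↔ pvNA (a :: b :: t') := by
        unfold pvMO; simp
      rw [hmo, pvNA_cons, and_assoc, pvMO_cons_cons]

theorem pvHead_free (p : List Char) (h : '+' ∉ p) : (pvHeadOk p ∧ pvCH p) ↔ pvNA p := by
  rw [pvCH_free p h]
  cases p with
  | nil => simp [pvHeadOk, pvMO, pvNA]
  | cons a t =>
    rw [← pvMO_cons_cons a t]
    have hh : pvHeadOk (a :: t) ↔ PySem.Chars.isalpha a = false := by simp [pvHeadOk]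
    rw [hh]

theorem pvLastOk_cons_cons (a b : Char) (t : List Char) :
    pvLastOk (a :: b :: t) ↔ pvLastOk (b :: t) := by
  simp [pvLastOk, List.getLast?_cons_cons]

theorem pvLast_free (p : List Char) (h : '+' ∉ p) : (pvLastOk p ∧ pvCH p) ↔ pvNA p := by
  induction p with
  | nil => simp [pvLastOk, pvCH, pvNA]
  | cons a t ih =>
    cases t with
    | nil => simp [pvLastOk, pvCH, pvNA]
    | cons b t' =>
      have ha : a ≠ '+' := fun e => h (e ▸ List.mem_cons_self)
      have hb : b ≠ '+' := fun e => h (List.mem_cons_of_mem _ (e ▸ List.mem_cons_self))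
      have h' : '+' ∉ b :: t' := fun hm => h (List.mem_cons_of_mem _ hm)
      have ih' := ih h'
      rw [pvLastOk_cons_cons, pvNA_cons]
      unfold pvCH
      rw [List.isChain_cons_cons, pvPairBad_free a b ha hb]
      constructor
      · rintro ⟨hlast, ⟨haa, hbb⟩, hch⟩
        exact ⟨haa, ih'.mp ⟨hlast, hch⟩⟩
      · rintro ⟨haa, hna⟩
        have := ih'.mpr hna
        exact ⟨this.1, ⟨haa, hna b List.mem_cons_self⟩, this.2⟩

theorem pvPairBad_plus_left (b : Char) : pvPairBad '+' b = false := by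
  simp [pvPairBad]
  intro h
  exact absurd h (by decide)

theorem pvPairBad_plus_right (a : Char) : pvPairBad a '+' = false := by
  simp [pvPairBad]
  intro h
  exact absurd h (by decide)

theorem pvCH_plus_cons (cs : List Char) : pvCH ('+' :: cs) ↔ pvCH cs := by
  unfold pvCH
  rw [List.isChain_cons]
  exact and_iff_right (fun y _ => pvPairBad_plus_left y)

theorem pvLastOk_plus_cons (p : List Char) : pvLastOk ('+' :: p) ↔ pvLastOk p := by
  cases p with
  | nil =>
    constructor
    · intro _ c hc; simp at hc
    · intro _ c hc
      simp [List.getLast?] at hc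
      subst hc
      decide
  | cons b t => exact pvLastOk_cons_cons '+' b t

-- segments after a '+': every interior one must be pvMO, the final one letter-free
theorem pvTail (ps : List (List Char)) (hne : ps ≠ []) (hfree : ∀ p ∈ ps, '+' ∉ p) :
    (pvLastOk ('+' :: List.intercalate ['+'] ps) ∧ pvCH ('+' :: List.intercalate ['+'] ps)) ↔
    ((∀ p ∈ ps.dropLast, pvMO p) ∧ pvNA (ps.getLast hne)) := by
  induction ps with
  | nil => exact absurd rfl hne
  | cons p t ih =>
    cases t with
    | nil =>
      have hic : List.intercalate ['+'] [p] = p := by simp [List.intercalate]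
      rw [hic, pvLastOk_plus_cons, pvCH_plus_cons]
      simp only [List.dropLast_singleton, List.getLast_singleton]
      rw [pvLast_free p (hfree p List.mem_cons_self)]
      simp
    | cons q qs =>
      have hic : List.intercalate ['+'] (p :: q :: qs)
          = p ++ '+' :: List.intercalate ['+'] (q :: qs) := by
        simp [List.intercalate, List.intersperse]
      rw [hic]
      have hsplit : ('+' :: (p ++ '+' :: List.intercalate ['+'] (q :: qs)))
          = ('+' :: p) ++ ('+' :: List.intercalate ['+'] (q :: qs)) := by simp
      rw [hsplit]
      have hch : pvCH (('+' :: p) ++ ('+' :: List.intercalate ['+'] (q :: qs)))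
          ↔ pvCH ('+' :: p) ∧ pvCH ('+' :: List.intercalate ['+'] (q :: qs)) := by
        unfold pvCH
        rw [List.isChain_append]
        have : ∀ x ∈ ('+' :: p).getLast?, ∀ y ∈ ('+' :: List.intercalate ['+'] (q :: qs)).head?,
            pvPairBad x y = false := by
          intro x _ y hy
          simp at hy
          subst hy
          exact pvPairBad_plus_right x
        exact ⟨fun h => ⟨h.1, h.2.1⟩, fun h => ⟨h.1, h.2, this⟩⟩
      have hlast : pvLastOk (('+' :: p) ++ ('+' :: List.intercalate ['+'] (q :: qs)))
          ↔ pvLastOk ('+' :: List.intercalate ['+'] (q :: qs)) := by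
        unfold pvLastOk
        rw [List.getLast?_append_of_ne_nil _ (by simp)]
      rw [hch, hlast, pvCH_plus_cons p, pvCH_free p (hfree p List.mem_cons_self)]
      rw [List.dropLast_cons₂, List.forall_mem_cons, List.getLast_cons_cons]
      have ih' := ih (by simp) (fun r hr => hfree r (List.mem_cons_of_mem _ hr))
      constructor
      · rintro ⟨hl, hmo, hch⟩
        have h2 := ih'.mp ⟨hl, hch⟩
        exact ⟨⟨hmo, h2.1⟩, h2.2⟩
      · rintro ⟨⟨hmo, hmids⟩, hna⟩
        have h2 := ih'.mpr ⟨hmids, hna⟩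
        exact ⟨h2.1, hmo, h2.2⟩

theorem pvNA_lastOk (p : List Char) (h : pvNA p) : pvLastOk p := by
  intro c hc
  exact h c (List.mem_of_getLast? hc)

-- MAIN: the chain/ends characterisation over the whole string, read off from its '+'-split
theorem pvMain (ps : List (List Char)) (hne : ps ≠ []) (hfree : ∀ p ∈ ps, '+' ∉ p) :
    (pvHeadOk (List.intercalate ['+'] ps) ∧ pvLastOk (List.intercalate ['+'] ps) ∧ pvCH (List.intercalate ['+'] ps)) ↔
    (pvNA (ps.head hne) ∧ pvNA (ps.getLast hne) ∧ ∀ p ∈ (ps.drop 1).dropLast, pvMO p) := by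
  cases ps with
  | nil => exact absurd rfl hne
  | cons p t =>
    cases t with
    | nil =>
      have hic : List.intercalate ['+'] [p] = p := by simp [List.intercalate]
      rw [hic]
      simp only [List.head_cons, List.getLast_singleton, List.drop_succ_cons, List.drop_nil,
        List.dropLast_nil]
      constructor
      · rintro ⟨hh, hl, hc⟩
        have := (pvHead_free p (hfree p List.mem_cons_self)).mp ⟨hh, hc⟩
        exact ⟨this, this, by simp⟩
      · rintro ⟨hna, -, -⟩
        have := (pvHead_free p (hfree p List.mem_cons_self)).mpr hna
        exact ⟨this.1, pvNA_lastOk p hna, this.2⟩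
    | cons q qs =>
      have hic : List.intercalate ['+'] (p :: q :: qs)
          = p ++ '+' :: List.intercalate ['+'] (q :: qs) := by
        simp [List.intercalate, List.intersperse]
      rw [hic]
      have hhead : pvHeadOk (p ++ '+' :: List.intercalate ['+'] (q :: qs)) ↔ pvHeadOk p := by
        cases p with
        | nil =>
          simp only [List.nil_append]
          constructor
          · intro _ c hc; simp at hc
          · intro _ c hc
            simp at hc
            subst hc
            decide
        | cons a p' => simp [pvHeadOk]
      have hlast : pvLastOk (p ++ '+' :: List.intercalate ['+'] (q :: qs))
          ↔ pvLastOk ('+' :: List.intercalate ['+'] (q :: qs)) := by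
        unfold pvLastOk
        rw [List.getLast?_append_of_ne_nil _ (by simp)]
      have hch : pvCH (p ++ '+' :: List.intercalate ['+'] (q :: qs))
          ↔ pvCH p ∧ pvCH ('+' :: List.intercalate ['+'] (q :: qs)) := by
        unfold pvCH
        rw [List.isChain_append]
        have : ∀ x ∈ p.getLast?, ∀ y ∈ ('+' :: List.intercalate ['+'] (q :: qs)).head?,
            pvPairBad x y = false := by
          intro x _ y hy
          simp at hy
          subst hy
          exact pvPairBad_plus_right x
        exact ⟨fun h => ⟨h.1, h.2.1⟩, fun h => ⟨h.1, h.2, this⟩⟩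
      rw [hhead, hlast, hch]
      have htail := pvTail (q :: qs) (by simp) (fun r hr => hfree r (List.mem_cons_of_mem _ hr))
      have hpf := pvHead_free p (hfree p List.mem_cons_self)
      simp only [List.head_cons, List.getLast_cons_cons, List.drop_succ_cons, List.drop_zero]
      constructor
      · rintro ⟨hh, hl, hcp, hct⟩
        have h1 := hpf.mp ⟨hh, hcp⟩
        have h2 := htail.mp ⟨hl, hct⟩
        exact ⟨h1, h2.2, h2.1⟩
      · rintro ⟨hna, hlast', hmids⟩
        have h1 := hpf.mpr hna
        have h2 := htail.mpr ⟨hmids, hlast'⟩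
        exact ⟨h1.1, h2.1, h1.2, h2.2⟩

-- split produces '+'-free parts
theorem pvSplit_free (cs : List Char) : ∀ p ∈ cs.splitOn '+', '+' ∉ p := by
  induction cs with
  | nil =>
    intro p hp
    simp [List.splitOn] at hp
    subst hp
    simp
  | cons c t ih =>
    intro p hp
    rw [List.splitOn, List.splitOnP_cons] at hp
    by_cases hc : c = '+'
    · rw [if_pos (by simp [hc])] at hp
      rcases List.mem_cons.mp hp with rfl | hp'
      · simp
      · exact ih p hp'
    · rw [if_neg (by simp [hc])] at hp
      rcases hsp : List.splitOnP (· == '+') t with _ | ⟨h1, t1⟩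
      · exact absurd hsp (List.splitOnP_ne_nil _ t)
      · rw [hsp] at hp
        simp only [List.modifyHead_cons] at hp
        rcases List.mem_cons.mp hp with rfl | hp'
        · intro hm
          rcases List.mem_cons.mp hm with e | hm'
          · exact hc e.symm
          · exact ih h1 (by rw [List.splitOn, hsp]; exact List.mem_cons_self) hm'
        · exact ih p (by rw [List.splitOn, hsp]; exact List.mem_cons_of_mem _ hp')

-- xs[1:-1] drops the first and last elements
theorem pvSlice_one_negone {α : Type} (xs : List α) :
    PySem.List.slice xs (some 1) (some (-1)) = xs.tail.dropLast := by
  simp only [PySem.List.slice, PySem.List.clampIdx]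
  norm_num
  rw [List.dropLast_eq_take]
  cases xs with
  | nil => simp
  | cons a t =>
    simp only [if_neg (List.cons_ne_nil a t), List.length_cons, List.tail_cons]
    have h1 : min 1 (t.length + 1) = 1 := by omega
    have h2 : (((t.length + 1 : Nat) : Int) + -1).toNat = t.length := by omega
    rw [h1, h2]
    simp

theorem pvHasAlpha_false (p : List Char) : pvHasAlpha p = false ↔ pvNA p := by
  simp [pvHasAlpha, pvNA]

-- A computes "true"/"false" according to the ends-and-pairs characterisation
theorem pvA_char (str : String) (hne : str.toList ≠ []) (b : Bool)
    (hgb : (pvHeadOk str.toList ∧ pvLastOk str.toList ∧ pvCH str.toList) ↔ b = true) :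
    SimpleSymbols str = if b then "true" else "false" := by
  unfold SimpleSymbols
  set cs := str.toList with hcs
  have hn : 0 < cs.length := List.length_pos_of_ne_nil hne
  have e0 : PySem.List.pyGet? cs 0 = some (cs[0]'hn) := by
    rw [PySem.List.pyGet?_zero]
    exact List.getElem?_eq_getElem hn
  have el : PySem.List.pyGet? cs (-1) = some (cs[cs.length - 1]'(by omega)) := by
    rw [PySem.List.pyGet?_neg_one, List.getLast?_eq_getElem?]
    exact List.getElem?_eq_getElem (by omega)
  have hhead? : cs.head? = some (cs[0]'hn) := by
    rw [List.head?_eq_getElem?]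
    exact List.getElem?_eq_getElem hn
  have hlast? : cs.getLast? = some (cs[cs.length - 1]'(by omega)) := by
    rw [List.getLast?_eq_getElem?]
    exact List.getElem?_eq_getElem (by omega)
  have hheadOk : pvHeadOk cs ↔ PySem.Chars.isalpha (cs[0]'hn) = false := by
    simp [pvHeadOk, hhead?]
  have hlastOk : pvLastOk cs ↔ PySem.Chars.isalpha (cs[cs.length - 1]'(by omega)) = false := by
    simp [pvLastOk, hlast?]
  simp only [e0, el]
  by_cases h0 : PySem.Chars.isalpha (cs[0]'hn) = true
  · rw [if_pos h0]
    cases b with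
    | false => rfl
    | true =>
      have hh := (hgb.mpr rfl).1
      rw [hheadOk.mp hh] at h0
      cases h0
  · rw [Bool.not_eq_true] at h0
    rw [if_neg (by rw [h0]; exact Bool.false_ne_true)]
    by_cases hl : PySem.Chars.isalpha (cs[cs.length - 1]'(by omega)) = true
    · rw [if_pos hl]
      cases b with
      | false => rfl
      | true =>
        have hll := (hgb.mpr rfl).2.1
        rw [hlastOk.mp hll] at hl
        cases hl
    · rw [Bool.not_eq_true] at hl
      rw [if_neg (by rw [hl]; exact Bool.false_ne_true)]
      have hin : ∀ i ∈ PySem.List.pyRange 1 ((cs.length : Int) - 1) 1,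
          PySem.List.pyGet? cs i ≠ none := by
        intro i hi
        rw [PySem.List.mem_pyRange_one] at hi
        rw [Ne, PySem.List.pyGet?_eq_none_iff, not_not]
        simp only [PySem.Raise.InRange]
        omega
      have hiff : (∀ i ∈ PySem.List.pyRange 1 ((cs.length : Int) - 1) 1, pvOkA cs i)
          ↔ (pvHeadOk cs ∧ pvLastOk cs ∧ pvCH cs) := by
        rw [pvCH, List.isChain_iff_getElem]
        constructor
        · intro hA
          refine ⟨hheadOk.mpr h0, hlastOk.mpr hl, ?_⟩
          intro k hk
          exact (pvBridge cs hne h0 hl).mp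
            (fun i hi1 hi2 => hA i (PySem.List.mem_pyRange_one.mpr ⟨hi1, hi2⟩)) k hk
        · rintro ⟨-, -, hP⟩
          intro i hi
          rw [PySem.List.mem_pyRange_one] at hi
          exact (pvBridge cs hne h0 hl).mpr (fun k hk => hP k hk) i hi.1 hi.2
      cases b with
      | true =>
        exact (simpleSymbolsLoop_true_iff cs _ hin).mpr (hiff.mpr (hgb.mpr rfl))
      | false =>
        rcases simpleSymbolsLoop_cases cs (PySem.List.pyRange 1 ((cs.length : Int) - 1) 1) with h | h
        · have := hgb.mp (hiff.mp ((simpleSymbolsLoop_true_iff cs _ hin).mp h))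
          cases this
        · exact h

-- B computes the same characterisation, read off the '+'-split
theorem pvB_char (str : String) (b : Bool)
    (hgb : (pvHeadOk str.toList ∧ pvLastOk str.toList ∧ pvCH str.toList) ↔ b = true) :
    SimpleSymbols_alt str = if b then "true" else "false" := by
  unfold SimpleSymbols_alt
  set cs := str.toList with hcs
  set ps := cs.splitOn '+' with hps
  have hpne : ps ≠ [] := by
    rw [hps, List.splitOn]
    exact List.splitOnP_ne_nil _ cs
  have hfree : ∀ p ∈ ps, '+' ∉ p := pvSplit_free cs
  have hic : List.intercalate ['+'] ps = cs := List.intercalate_splitOn cs '+'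
  have hlp : 0 < ps.length := List.length_pos_of_ne_nil hpne
  have hp0 : PySem.List.pyGet? ps 0 = some (ps.head hpne) := by
    rw [PySem.List.pyGet?_zero, List.getElem?_eq_getElem hlp]
    rw [List.getElem_zero_eq_head]
  have hpl : PySem.List.pyGet? ps (-1) = some (ps.getLast hpne) := by
    rw [PySem.List.pyGet?_neg_one]
    exact List.getLast?_eq_some_getLast hpne
  simp only [hp0, hpl]
  have hmain := pvMain ps hpne hfree
  rw [hic] at hmain
  rw [pvSlice_one_negone, ← List.drop_one]
  have hmid : ((ps.drop 1).dropLast.any (fun p => decide (1 < p.length) && pvHasAlpha p) = false)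
      ↔ (∀ p ∈ (ps.drop 1).dropLast, pvMO p) := by
    rw [List.any_eq_false]
    constructor
    · intro h p hp hlen
      have := h p hp
      simp only [Bool.and_eq_true, decide_eq_true_eq, not_and] at this
      exact (pvHasAlpha_false p).mp (Bool.not_eq_true _ ▸ this hlen)
    · intro h p hp
      simp only [Bool.and_eq_true, decide_eq_true_eq, not_and]
      intro hlen
      rw [(pvHasAlpha_false p).mpr (h p hp hlen)]
      exact Bool.false_ne_true
  cases b with
  | true =>
    have h3 := hmain.mp (hgb.mpr rfl)
    rw [(pvHasAlpha_false _).mpr h3.1, (pvHasAlpha_false _).mpr h3.2.1]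
    simp only [Bool.or_self, Bool.false_eq_true, if_false]
    rw [hmid.mpr h3.2.2]
    simp
  | false =>
    have hg : ¬ (pvHeadOk cs ∧ pvLastOk cs ∧ pvCH cs) := by
      intro h
      cases hgb.mp h
    by_cases hb1 : (pvHasAlpha (ps.head hpne) || pvHasAlpha (ps.getLast hpne)) = true
    · rw [if_pos hb1]
      simp
    · rw [if_neg hb1]
      rw [Bool.or_eq_true, not_or] at hb1
      have hna1 := (pvHasAlpha_false _).mp (Bool.not_eq_true _ ▸ hb1.1)
      have hna2 := (pvHasAlpha_false _).mp (Bool.not_eq_true _ ▸ hb1.2)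
      have hnm : ¬ ∀ p ∈ (ps.drop 1).dropLast, pvMO p := by
        intro hmids
        exact hg (hmain.mpr ⟨hna1, hna2, hmids⟩)
      rw [if_pos (by
        rcases Bool.eq_false_or_eq_true ((ps.drop 1).dropLast.any (fun p => decide (1 < p.length) && pvHasAlpha p)) with h | h
        · exact h
        · exact absurd (hmid.mp h) hnm)]
      simp

-- ===== VERDICT (by name: the statement is the Claim_ definition above) =====
theorem SimpleSymbols_spec : Claim_equal_SimpleSymbols := by
  intro str _ hpre
  unfold Spec_SimpleSymbols
  have hne : str.toList ≠ [] := fun hnil => hpre (String.toList_eq_nil_iff.mp hnil)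
  by_cases hg : pvHeadOk str.toList ∧ pvLastOk str.toList ∧ pvCH str.toList
  · rw [pvA_char str hne true (iff_of_true hg rfl),
        pvB_char str true (iff_of_true hg rfl)]
  · rw [pvA_char str hne false (iff_of_false hg (by simp)),
        pvB_char str false (iff_of_false hg (by simp))]
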